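-- pv_equiv track=rewrite | github.com/btc-c0der/omega-btc-ai | quantum_pow/gradio_qpow_explorer.py | visualize_hash_difference
-- ===== SOURCE A (Python) =====
-- def visualize_hash_difference(hash1: str, hash2: str) -> str:
--     """Create a visual representation of hash differences"""
--     differences = []
--     for i, (c1, c2) in enumerate(zip(hash1, hash2)):
--         if c1 != c2:
--             differences.append(i)
--
--     # Create a simple text visualization
--     viz = "Hash Difference Visualization:\n"
--     viz += "Position: " + "".join(str(i % 10) for i in range(len(hash1))) + "\n"
--     viz += "Hash 1:   " + hash1 + "\n"
--     viz += "Hash 2:   " + hash2 + "\n"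
--     viz += "Diff:     " + "".join("^" if i in differences else " " for i in range(len(hash1))) + "\n"
--     viz += f"\nDifferences at positions: {differences[:20]}..." if len(differences) > 20 else f"\nDifferences at positions: {differences}"
--
--     return viz
-- ===== SOURCE B (Python) =====
-- def visualize_hash_difference(hash1: str, hash2: str) -> str:
--     """Create a visual representation of hash differences (single-pass rewrite)."""
--     differences = []
--     markers = []
--     for i, (c1, c2) in enumerate(zip(hash1, hash2)):
--         if c1 != c2:
--             differences.append(i)
--             markers.append("^")
--         else:
--             markers.append(" ")
--     shown = differences[:20] if len(differences) > 20 else differences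
--     suffix = "..." if len(differences) > 20 else ""
--     lines = [
--         "Hash Difference Visualization:",
--         "Position: " + "".join(str(i % 10) for i in range(len(hash1))),
--         "Hash 1:   " + hash1,
--         "Hash 2:   " + hash2,
--         "Diff:     " + "".join(markers).ljust(len(hash1)),
--         "",
--         f"Differences at positions: {shown}{suffix}",
--     ]
--     return "\n".join(lines)
-- ===== Notes on version B (the rewrite author's own statement) =====
-- stated objective: faster
-- what changed: B builds the differences list and the '^'/' ' marker row in one pass over zip(hash1, hash2) and pads the marker row to len(hash1), eliminating A's second scan over range(len(hash1)) with its 'i in differences' list-membership test, and assembles the output as a '\n'.join of lines.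
import Mathlib
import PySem

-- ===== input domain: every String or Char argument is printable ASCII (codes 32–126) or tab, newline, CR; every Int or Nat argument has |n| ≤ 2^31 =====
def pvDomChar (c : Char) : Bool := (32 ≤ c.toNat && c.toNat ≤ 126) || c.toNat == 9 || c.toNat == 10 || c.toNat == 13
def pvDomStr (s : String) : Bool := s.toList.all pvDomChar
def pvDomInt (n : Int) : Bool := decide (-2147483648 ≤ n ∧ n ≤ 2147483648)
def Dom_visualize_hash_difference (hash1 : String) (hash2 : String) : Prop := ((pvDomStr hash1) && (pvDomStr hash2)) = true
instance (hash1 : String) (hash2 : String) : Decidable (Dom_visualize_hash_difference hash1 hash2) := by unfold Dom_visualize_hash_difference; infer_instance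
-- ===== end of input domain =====

-- B fuses A's two scans into one pass that builds the differences list and the marker row together
-- (padding the marker row to len(hash1)), removing the 'i in differences' membership test; objective: faster.

-- repr of a Python list of ints, e.g. "[1, 2]"
def pvListRepr (l : List Int) : String :=
  "[" ++ PySem.Str.join ", " (l.map PySem.Int.toStr) ++ "]"

-- ===== PORT A =====
-- for i, (c1, c2) in enumerate(zip(hash1, hash2)): if c1 != c2: differences.append(i)
def pvA_diffLoop : Int → List (Char × Char) → List Int
  | _, [] => []
  | i, p :: rest => if p.1 ≠ p.2 then i :: pvA_diffLoop (i + 1) rest else pvA_diffLoop (i + 1) rest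

def visualize_hash_difference (hash1 : String) (hash2 : String) : String :=
  let differences := pvA_diffLoop 0 (hash1.toList.zip hash2.toList)
  let n : Int := (hash1.toList.length : Int)
  let posLine := PySem.Str.join "" ((PySem.List.pyRange 0 n 1).map (fun i => PySem.Int.toStr (PySem.Int.mod i 10)))
  let diffLine := PySem.Str.join "" ((PySem.List.pyRange 0 n 1).map (fun i => if i ∈ differences then "^" else " "))
  let tail :=
    if differences.length > 20 then
      "\nDifferences at positions: " ++ pvListRepr (PySem.List.slice differences none (some 20)) ++ "..."
    else
      "\nDifferences at positions: " ++ pvListRepr differences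
  "Hash Difference Visualization:\n" ++ ("Position: " ++ posLine ++ "\n") ++
    ("Hash 1:   " ++ hash1 ++ "\n") ++ ("Hash 2:   " ++ hash2 ++ "\n") ++
    ("Diff:     " ++ diffLine ++ "\n") ++ tail

-- ===== PORT B =====
-- single pass: differences and markers built together
def pvB_loop : Int → List (Char × Char) → List Int × List Char
  | _, [] => ([], [])
  | i, p :: rest =>
    let r := pvB_loop (i + 1) rest
    if p.1 ≠ p.2 then (i :: r.1, '^' :: r.2) else (r.1, ' ' :: r.2)

def visualize_hash_difference_alt (hash1 : String) (hash2 : String) : String :=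
  let r := pvB_loop 0 (hash1.toList.zip hash2.toList)
  let differences := r.1
  let markers := r.2
  let shown := if differences.length > 20 then PySem.List.slice differences none (some 20) else differences
  let suffix := if differences.length > 20 then "..." else ""
  PySem.Str.join "\n"
    [ "Hash Difference Visualization:",
      "Position: " ++ PySem.Str.join "" ((PySem.List.pyRange 0 (hash1.toList.length : Int) 1).map
        (fun i => PySem.Int.toStr (PySem.Int.mod i 10))),
      "Hash 1:   " ++ hash1,
      "Hash 2:   " ++ hash2,
      -- "".join(markers).ljust(len(hash1)) : pad with spaces up to len(hash1)
      "Diff:     " ++ String.ofList (markers ++ List.replicate (hash1.toList.length - markers.length) ' '),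
      "",
      "Differences at positions: " ++ pvListRepr shown ++ suffix ]

-- ===== PRECONDITION & SPEC =====
def Spec_visualize_hash_difference (hash1 : String) (hash2 : String) (out : String) : Prop := out = visualize_hash_difference_alt hash1 hash2
instance (hash1 : String) (hash2 : String) (out : String) : Decidable (Spec_visualize_hash_difference hash1 hash2 out) := by unfold Spec_visualize_hash_difference; infer_instance

-- ===== CLAIM (what is proved, stated in full; the proofs are below) =====
def Claim_equal_visualize_hash_difference : Prop := ∀ (hash1 : String) (hash2 : String), Dom_visualize_hash_difference hash1 hash2 → Spec_visualize_hash_difference hash1 hash2 (visualize_hash_difference hash1 hash2)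

-- ===== LEMMAS AND PROOFS =====

theorem pvA_diffLoop_lb (zs : List (Char × Char)) : ∀ (i j : Int), j ∈ pvA_diffLoop i zs → i ≤ j := by
  induction zs with
  | nil => intro i j h; simp [pvA_diffLoop] at h
  | cons z rest ih =>
    intro i j h
    simp only [pvA_diffLoop] at h
    split at h
    · rcases List.mem_cons.mp h with h | h
      · omega
      · have := ih (i + 1) j h; omega
    · have := ih (i + 1) j h; omega

theorem pvB_loop_fst (zs : List (Char × Char)) : ∀ i, (pvB_loop i zs).1 = pvA_diffLoop i zs := by
  induction zs with
  | nil => intro i; rfl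
  | cons z rest ih =>
    intro i
    simp only [pvB_loop, pvA_diffLoop]
    split <;> simp [ih]

theorem pvB_loop_len (zs : List (Char × Char)) : ∀ i, (pvB_loop i zs).2.length = zs.length := by
  induction zs with
  | nil => intro i; rfl
  | cons z rest ih =>
    intro i
    simp only [pvB_loop]
    split <;> simp [ih]

theorem pv_pad_flatten (k : Nat) : ∀ (i : Int),
    (((PySem.List.pyRange i (i + k) 1).map (fun _ => [' '])).flatten : List Char) = List.replicate k ' ' := by
  induction k with
  | zero => intro i; simp
  | succ n ih =>
    intro i
    rw [PySem.List.pyRange_one_cons (by omega)]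
    have h : i + 1 + (n : Int) = i + ((n : Nat) + 1 : Nat) := by push_cast; ring
    simp only [List.map_cons, List.flatten_cons, List.replicate_succ]
    rw [← h, ih (i + 1)]
    simp

theorem pv_diffLine (zs : List (Char × Char)) : ∀ (i : Int) (k : Nat),
    (((PySem.List.pyRange i (i + zs.length + k) 1).map
        (fun j => if j ∈ pvA_diffLoop i zs then ['^'] else ([' '] : List Char))).flatten)
      = (pvB_loop i zs).2 ++ List.replicate k ' ' := by
  induction zs with
  | nil =>
    intro i k
    simp only [pvA_diffLoop, List.not_mem_nil, List.length_nil, Nat.cast_zero, add_zero,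
      pvB_loop, List.nil_append]
    exact pv_pad_flatten k i
  | cons z rest ih =>
    intro i k
    have hlen : i + ((z :: rest).length : Int) + k = (i + 1) + (rest.length : Int) + k := by
      simp; ring
    rw [hlen, PySem.List.pyRange_one_cons (by omega)]
    have hnot : i ∉ pvA_diffLoop (i + 1) rest := fun h => by
      have := pvA_diffLoop_lb rest (i + 1) i h; omega
    have hmem : ∀ j : Int, j ∈ PySem.List.pyRange (i + 1) (i + 1 + (rest.length : Int) + k) 1 →
        (j ∈ pvA_diffLoop i (z :: rest) ↔ j ∈ pvA_diffLoop (i + 1) rest) := by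
      intro j hj
      have hj1 : i + 1 ≤ j := (PySem.List.mem_pyRange_one.mp hj).1
      simp only [pvA_diffLoop]
      split
      · simp only [List.mem_cons]
        constructor
        · rintro (rfl | h)
          · omega
          · exact h
        · intro h; right; exact h
      · exact Iff.rfl
    have hmap : (PySem.List.pyRange (i + 1) (i + 1 + (rest.length : Int) + k) 1).map
          (fun j => if j ∈ pvA_diffLoop i (z :: rest) then ['^'] else ([' '] : List Char))
        = (PySem.List.pyRange (i + 1) (i + 1 + (rest.length : Int) + k) 1).map
          (fun j => if j ∈ pvA_diffLoop (i + 1) rest then ['^'] else ([' '] : List Char)) := by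
      apply List.map_congr_left
      intro j hj
      rw [if_congr (hmem j hj) rfl rfl]
    rw [List.map_cons, List.flatten_cons, hmap, ih (i + 1) k]
    by_cases hz : z.1 ≠ z.2
    · simp only [pvA_diffLoop, pvB_loop, if_pos hz]
      simp
    · simp only [pvA_diffLoop, pvB_loop, if_neg hz]
      simp [hnot]

theorem pv_flatten_intersperse_nil {α : Type} (l : List (List α)) :
    (List.intersperse ([] : List α) l).flatten = l.flatten := by
  induction l with
  | nil => rfl
  | cons a t ih =>
    cases t with
    | nil => rfl
    | cons b t2 =>
      simp only [List.intersperse, List.flatten_cons] at *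
      simp [ih]

theorem pv_main (hash1 hash2 : String) :
    visualize_hash_difference hash1 hash2 = visualize_hash_difference_alt hash1 hash2 := by
  apply String.toList_injective
  unfold visualize_hash_difference visualize_hash_difference_alt
  set zs := hash1.toList.zip hash2.toList with hzs
  have hz : zs.length ≤ hash1.length := by
    rw [hzs]; simp [List.length_zip]
  set k : Nat := hash1.length - zs.length with hk
  have hn : (hash1.length : Int) = 0 + (zs.length : Int) + (k : Int) := by
    omega
  have hdiff : ((PySem.List.pyRange 0 (hash1.length : Int) 1).map
        (fun j => if j ∈ pvA_diffLoop 0 zs then ['^'] else ([' '] : List Char))).flatten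
      = (pvB_loop 0 zs).2 ++ List.replicate k ' ' := by
    rw [hn]; exact pv_diffLine zs 0 k
  have hpadlen : hash1.length - (pvB_loop 0 zs).2.length = k := by
    rw [pvB_loop_len]
  have hcomp : (String.toList ∘ fun j => if j ∈ pvA_diffLoop 0 zs then "^" else " ")
      = fun j => if j ∈ pvA_diffLoop 0 zs then ['^'] else ([' '] : List Char) := by
    funext j; by_cases h : j ∈ pvA_diffLoop 0 zs <;> simp [h]
  by_cases h20 : (pvA_diffLoop 0 zs).length > 20 <;>
    simp [h20, pvListRepr, pvB_loop_fst, hpadlen, hcomp, hdiff, pv_flatten_intersperse_nil,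
      PySem.Chars.join, List.intercalate, List.append_assoc]

-- ===== VERDICT (by name: the statement is the Claim_ definition above) =====
theorem visualize_hash_difference_spec : Claim_equal_visualize_hash_difference := by
  intro hash1 hash2 _
  unfold Spec_visualize_hash_difference
  exact pv_main hash1 hash2
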